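-- pv_equiv track=rewrite | github.com/pypi-data/pypi-mirror-374 | packages/lackey-mcp/lackey_mcp-5.0.1.tar.gz/lackey_mcp-5.0.1/src/lackey/mcp/lackey_suggest.py | _prioritize_optional_parameters
-- ===== SOURCE A (Python) =====
-- from typing import Any, Dict, List, Optional
--
-- def _prioritize_optional_parameters(
--
--     optional_params: Dict[str, Any],
--     current_params: Dict[str, Any],
--     schema: Dict[str, Any],
-- ) -> List[str]:
--     """Prioritize optional parameters based on context."""
--     # Simple priority based on common parameter importance
--     priority_order = [
--         "status",
--         "assignee",
--         "priority",
--         "tags",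
--         "description",
--         "note",
--     ]
--
--     available_optional = [p for p in optional_params if p not in current_params]
--
--     # Sort by priority order
--     prioritized = []
--     for priority_param in priority_order:
--         if priority_param in available_optional:
--             prioritized.append(priority_param)
--
--     # Add remaining parameters
--     for param in available_optional:
--         if param not in prioritized:
--             prioritized.append(param)
--
--     return prioritized
-- ===== SOURCE B (Python) =====
-- def _prioritize_optional_parameters(optional_params, current_params, schema):
--     """Prioritize optional parameters based on context."""
--     priority_order = [
--         "status",
--         "assignee",
--         "priority",
--         "tags",
--         "description",
--         "note",
--     ]
--     rank = {name: i for i, name in enumerate(priority_order)}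
--     buckets = [[] for _ in range(len(priority_order) + 1)]
--     for p in optional_params:
--         if p not in current_params:
--             buckets[rank.get(p, len(priority_order))].append(p)
--     return [p for bucket in buckets for p in bucket]
-- ===== Notes on version B (the rewrite author's own statement) =====
-- stated objective: alternative
-- what changed: Replaces A's two membership-scanning passes (priority scan over available with 'in available', then append-if-'not in prioritized' over available) with a single bucket distribution: each available key goes straight into the bucket of its rank (0-5 for priority names, 6 for the rest) and the buckets are flattened.
import Mathlib
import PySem

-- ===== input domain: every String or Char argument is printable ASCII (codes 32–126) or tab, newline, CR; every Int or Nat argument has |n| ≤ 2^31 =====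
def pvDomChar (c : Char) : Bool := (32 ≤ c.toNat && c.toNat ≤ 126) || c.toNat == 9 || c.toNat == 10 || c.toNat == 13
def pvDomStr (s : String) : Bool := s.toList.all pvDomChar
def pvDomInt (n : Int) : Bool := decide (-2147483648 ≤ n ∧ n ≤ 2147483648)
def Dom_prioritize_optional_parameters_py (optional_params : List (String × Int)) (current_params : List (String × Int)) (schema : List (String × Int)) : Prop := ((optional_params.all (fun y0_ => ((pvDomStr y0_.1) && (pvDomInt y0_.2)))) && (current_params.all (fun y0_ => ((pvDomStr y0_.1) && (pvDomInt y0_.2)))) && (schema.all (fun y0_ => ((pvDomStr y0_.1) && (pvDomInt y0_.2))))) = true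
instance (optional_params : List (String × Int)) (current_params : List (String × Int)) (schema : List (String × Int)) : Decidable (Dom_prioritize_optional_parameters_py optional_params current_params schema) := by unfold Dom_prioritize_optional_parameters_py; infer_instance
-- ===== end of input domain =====

-- B replaces A's two membership-scanning passes with a single bucket distribution
-- (each available key goes into the bucket of its rank, then the buckets are flattened);
-- same return value.

-- ===== PORT A =====
-- dict arguments arrive as assoc lists; iterating a Python dict visits each key once,
-- in first-insertion order, so `for p in optional_params` is PySem.List.dedup of the keys.
def prioritize_optional_parameters_py (optional_params : List (String × Int)) (current_params : List (String × Int)) (schema : List (String × Int)) : List String :=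
  let priority_order : List String := ["status", "assignee", "priority", "tags", "description", "note"]
  let available_optional : List String :=
    (PySem.List.dedup (optional_params.map Prod.fst)).filter
      (fun p => !((current_params.map Prod.fst).contains p))
  let prioritized : List String :=
    priority_order.foldl
      (fun acc priority_param =>
        if available_optional.contains priority_param then acc ++ [priority_param] else acc) []
  available_optional.foldl
    (fun acc param => if acc.contains param then acc else acc ++ [param]) prioritized

-- ===== PORT B =====
def prioritize_optional_parameters_py_alt (optional_params : List (String × Int)) (current_params : List (String × Int)) (schema : List (String × Int)) : List String :=
  let priority_order : List String := ["status", "assignee", "priority", "tags", "description", "note"]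
  let rank : PySem.Dict String Int :=
    (PySem.List.enumerate priority_order).foldl (fun d iv => d.insert iv.2 iv.1) PySem.Dict.empty
  let buckets : List (List String) :=
    (PySem.List.dedup (optional_params.map Prod.fst)).foldl
      (fun bs p =>
        if !((current_params.map Prod.fst).contains p) then
          let i : Int := rank.getD p (priority_order.length : Int)
          PySem.List.pySetD bs i (PySem.List.pyGetD bs i [] ++ [p])
        else bs)
      (List.replicate (priority_order.length + 1) [])
  buckets.flatten

-- ===== PRECONDITION & SPEC =====
def Spec_prioritize_optional_parameters_py (optional_params : List (String × Int)) (current_params : List (String × Int)) (schema : List (String × Int)) (out : List String) : Prop := out = prioritize_optional_parameters_py_alt optional_params current_params schema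
instance (optional_params : List (String × Int)) (current_params : List (String × Int)) (schema : List (String × Int)) (out : List String) : Decidable (Spec_prioritize_optional_parameters_py optional_params current_params schema out) := by unfold Spec_prioritize_optional_parameters_py; infer_instance

-- ===== CLAIM (what is proved, stated in full; the proofs are below) =====
def Claim_equal_prioritize_optional_parameters_py : Prop := ∀ (optional_params : List (String × Int)) (current_params : List (String × Int)) (schema : List (String × Int)), Dom_prioritize_optional_parameters_py optional_params current_params schema → Spec_prioritize_optional_parameters_py optional_params current_params schema (prioritize_optional_parameters_py optional_params current_params schema)

-- ===== LEMMAS AND PROOFS =====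

-- A's first loop is a filter of the priority list
theorem pv_foldl_filter (cond : String → Bool) (l : List String) (acc : List String) :
    l.foldl (fun a x => if cond x then a ++ [x] else a) acc = acc ++ l.filter cond := by
  induction l generalizing acc with
  | nil => simp
  | cons x l ih =>
    by_cases h : cond x <;> simp [h, ih]

-- A's second loop over a duplicate-free list appends exactly the not-yet-present elements.
theorem pv_foldl_appendNew (l : List String) (acc0 : List String) (hnd : l.Nodup) :
    l.foldl (fun acc p => if acc.contains p then acc else acc ++ [p]) acc0
      = acc0 ++ l.filter (fun p => !acc0.contains p) := by
  induction l generalizing acc0 with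
  | nil => simp
  | cons x l ih =>
    have hx : x ∉ l := (List.nodup_cons.mp hnd).1
    have hl : l.Nodup := (List.nodup_cons.mp hnd).2
    by_cases hmem : x ∈ acc0
    · have : acc0.contains x = true := by simpa using hmem
      simp only [List.foldl_cons, this, List.filter_cons]
      simp only [Bool.not_true]
      exact ih acc0 hl
    · have hc : acc0.contains x = false := by simpa using hmem
      simp only [List.foldl_cons, hc, Bool.false_eq_true, if_false, List.filter_cons, Bool.not_false]
      rw [ih (acc0 ++ [x]) hl]
      have : l.filter (fun p => !(acc0 ++ [x]).contains p) = l.filter (fun p => !acc0.contains p) := by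
        apply List.filter_congr
        intro p hp
        have : p ≠ x := fun h => hx (h ▸ hp)
        simp [this]
      rw [this]
      simp

-- the rank dict computes the position of p in the priority list (absent names map past it)
theorem pv_rank_getD (p : String) :
    ((PySem.List.enumerate ["status", "assignee", "priority", "tags", "description", "note"]).foldl
        (fun d iv => d.insert iv.2 iv.1) PySem.Dict.empty).getD p
        ((["status", "assignee", "priority", "tags", "description", "note"] : List String).length : Int)
      = (((["status", "assignee", "priority", "tags", "description", "note"] : List String).idxOf p : Nat) : Int) := by
  have h : ((PySem.List.enumerate ["status", "assignee", "priority", "tags", "description", "note"]).foldl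
        (fun d iv => d.insert iv.2 iv.1) PySem.Dict.empty)
      = PySem.Dict.mk [("status", 0), ("assignee", 1), ("priority", 2), ("tags", 3), ("description", 4), ("note", 5)] := by
    rfl
  rw [h, PySem.Dict.getD_eq_get?_getD]
  simp only [PySem.Dict.get?_mk_cons]
  by_cases h1 : "status" = p <;> by_cases h2 : "assignee" = p <;> by_cases h3 : "priority" = p <;>
    by_cases h4 : "tags" = p <;> by_cases h5 : "description" = p <;> by_cases h6 : "note" = p <;>
    simp_all [List.idxOf_cons_ne, PySem.Dict.get?]

-- B's bucket-distribution fold described bucket by bucket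
theorem pv_bucket_fold (cond : String → Bool) (key : String → Nat) (l : List String)
    (bs : List (List String)) (hk : ∀ p, cond p = true → key p < bs.length) :
    l.foldl (fun bs p => if cond p then bs.set (key p) (bs.getD (key p) [] ++ [p]) else bs) bs
      = (List.range bs.length).map
          (fun i => bs.getD i [] ++ (l.filter cond).filter (fun p => key p = i)) := by
  induction l generalizing bs with
  | nil =>
    simp only [List.foldl_nil, List.filter_nil]
    apply List.ext_getElem
    · simp
    · intro i h1 h2
      simp at h2
      simp [List.getD_eq_getElem?_getD, List.getElem?_eq_getElem h2]
  | cons x l ih =>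
    by_cases hx : cond x
    · have hkx : key x < bs.length := hk x hx
      simp only [List.foldl_cons, hx, if_true]
      rw [ih _ (by intro p hp; simpa [hkx] using hk p hp), List.length_set]
      apply List.map_congr_left
      intro i hi
      have hi' : i < bs.length := by simpa using hi
      rw [List.filter_cons]
      simp only [hx]
      by_cases hix : key x = i
      · subst hix
        rw [List.getD_eq_getElem?_getD, List.getElem?_set_self (by simpa using hkx)]
        simp [List.getD_eq_getElem?_getD, List.append_assoc]
      · rw [List.getD_eq_getElem?_getD, List.getElem?_set_ne (by omega)]
        simp [hix, List.getD_eq_getElem?_getD]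
    · simp only [List.foldl_cons, hx, Bool.false_eq_true, if_false, List.filter_cons]
      rw [ih _ hk]

-- a duplicate-free list keeps at most one element equal to a
theorem pv_filter_eq (l : List String) (a : String) (h : l.Nodup) :
    l.filter (fun p => p == a) = if l.contains a then [a] else [] := by
  induction l with
  | nil => simp
  | cons x l ih =>
    have hx : x ∉ l := (List.nodup_cons.mp h).1
    have hl : l.Nodup := (List.nodup_cons.mp h).2
    by_cases hxa : x = a
    · subst hxa
      have : l.filter (fun p => p == x) = [] := by
        apply List.filter_eq_nil_iff.mpr
        intro p hp
        simp only [beq_iff_eq]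
        exact fun he => hx (he ▸ hp)
      simp [this]
    · simp only [List.filter_cons, beq_iff_eq, hxa, if_false, ih hl, List.contains_cons]
      have : (a == x) = false := by simpa using Ne.symm hxa
      simp [this]

-- ===== VERDICT (by name: the statement is the Claim_ definition above) =====
theorem prioritize_optional_parameters_py_spec : Claim_equal_prioritize_optional_parameters_py := by
  intro op cp sc _
  unfold Spec_prioritize_optional_parameters_py
  simp only [prioritize_optional_parameters_py, prioritize_optional_parameters_py_alt]
  set prio : List String := ["status", "assignee", "priority", "tags", "description", "note"] with hprio
  set keys : List String := PySem.List.dedup (op.map Prod.fst) with hkeys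
  set cond : String → Bool := fun p => !((cp.map Prod.fst).contains p) with hcond
  set avail : List String := keys.filter cond with havail
  have hnd : avail.Nodup := List.Nodup.filter _ (PySem.List.nodup_dedup _)
  -- B's step function, with the rank dict evaluated to the capped index
  have hstep :
      (fun (bs : List (List String)) (p : String) =>
        if cond p then
          PySem.List.pySetD bs
            ((((PySem.List.enumerate prio).foldl (fun d iv => d.insert iv.2 iv.1)
                PySem.Dict.empty).getD p (prio.length : Int)))
            (PySem.List.pyGetD bs
              ((((PySem.List.enumerate prio).foldl (fun d iv => d.insert iv.2 iv.1)
                  PySem.Dict.empty).getD p (prio.length : Int))) [] ++ [p])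
        else bs)
      = (fun (bs : List (List String)) (p : String) =>
          if cond p then bs.set (prio.idxOf p) (bs.getD (prio.idxOf p) [] ++ [p]) else bs) := by
    funext bs p
    rw [hprio, pv_rank_getD p]
    simp [PySem.List.pySetD_natCast, PySem.List.pyGetD_natCast]
  rw [hstep]
  -- evaluate A's two passes
  rw [pv_foldl_filter, pv_foldl_appendNew _ _ hnd, List.nil_append]
  -- in A's second pass, membership in the already-built prefix is membership in prio
  have hA2 : avail.filter (fun p => !((prio.filter (fun q => avail.contains q)).contains p))
      = avail.filter (fun p => !(prio.contains p)) := by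
    apply List.filter_congr
    intro p hp
    simp [List.mem_filter, hp]
  rw [hA2]
  -- evaluate B's bucket distribution
  have hk : ∀ p, cond p = true → prio.idxOf p < (List.replicate (prio.length + 1) ([] : List String)).length := by
    intro p _
    simpa using Nat.lt_succ_of_le (List.idxOf_le_length)
  rw [pv_bucket_fold cond (fun p => prio.idxOf p) keys _ hk]
  -- both sides bucket by bucket
  have hgetD : ∀ i, (List.replicate (prio.length + 1) ([] : List String)).getD i [] = [] := by
    intro i
    rcases Nat.lt_or_ge i (prio.length + 1) with h | h
    · rw [List.getD_eq_getElem?_getD,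
        List.getElem?_eq_getElem (by simp only [List.length_replicate]; omega)]
      simp
    · rw [List.getD_eq_getElem?_getD,
        List.getElem?_eq_none (by simp only [List.length_replicate]; omega)]
      rfl
  have hrange : List.range (List.replicate (prio.length + 1) ([] : List String)).length
      = [0, 1, 2, 3, 4, 5, 6] := by rw [hprio]; rfl
  rw [hrange]
  simp only [List.map_cons, List.map_nil, hgetD, List.nil_append, List.flatten]
  -- bucket i < 6 holds the i-th priority name if available, bucket 6 the rest in order
  have hbi : ∀ (i : Nat) (a : String), i < 6 → prio.idxOf a = i →
      avail.filter (fun p => prio.idxOf p = i) = if avail.contains a then [a] else [] := by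
    intro i a hi ha
    rw [← pv_filter_eq avail a hnd]
    apply List.filter_congr
    intro p _
    rw [← ha]
    rw [Bool.eq_iff_iff]
    simp only [decide_eq_true_eq, beq_iff_eq]
    constructor
    · intro h'
      have hpm : p ∈ prio := by
        by_contra hpn
        have : prio.idxOf p = prio.length := List.idxOf_of_notMem hpn
        rw [this] at h'
        rw [hprio] at h' ha
        simp at h'
        omega
      have ham : a ∈ prio := by
        by_contra han
        have : prio.idxOf a = prio.length := List.idxOf_of_notMem han
        rw [ha] at this
        rw [hprio] at this
        simp at this
        omega
      have hge : prio[prio.idxOf p]'(List.idxOf_lt_length_of_mem hpm) = p :=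
        List.getElem_idxOf (List.idxOf_lt_length_of_mem hpm)
      have hga : prio[prio.idxOf a]'(List.idxOf_lt_length_of_mem ham) = a :=
        List.getElem_idxOf (List.idxOf_lt_length_of_mem ham)
      rw [← hge, ← hga]
      congr 1
    · intro h
      subst h
      rfl
  have h0 := hbi 0 "status" (by omega) (by rw [hprio]; decide)
  have h1 := hbi 1 "assignee" (by omega) (by rw [hprio]; decide)
  have h2 := hbi 2 "priority" (by omega) (by rw [hprio]; decide)
  have h3 := hbi 3 "tags" (by omega) (by rw [hprio]; decide)
  have h4 := hbi 4 "description" (by omega) (by rw [hprio]; decide)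
  have h5 := hbi 5 "note" (by omega) (by rw [hprio]; decide)
  have h6 : avail.filter (fun p => prio.idxOf p = 6) = avail.filter (fun p => !prio.contains p) := by
    apply List.filter_congr
    intro p _
    by_cases hm : p ∈ prio
    · have : prio.idxOf p < 6 := by
        have := List.idxOf_lt_length_of_mem hm
        rw [hprio] at this
        simpa using this
      simp [hm]
      omega
    · have h6' : prio.idxOf p = 6 := by
        rw [List.idxOf_of_notMem hm, hprio]
        rfl
      simp only [List.contains_eq_mem, hm, decide_false, Bool.not_false, h6']
      simp
  rw [h0, h1, h2, h3, h4, h5, h6]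
  clear h0 h1 h2 h3 h4 h5 h6 hbi hstep hk hgetD hrange hnd
  -- the priority-side filter on the literal list, unfolded
  rw [hprio]
  simp only [List.filter_cons, List.filter_nil]
  split_ifs <;> simp
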